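-- pv_equiv track=rewrite | github.com/Sagharn/onlinejudge | 13055 Inception.py | ch
-- ===== SOURCE A (Python) =====
-- def ch(s):
--     m = ""
--     c = 0
--     for i in range(len(s)):
--         if s[i] == ' ':
--             c = 1
--         elif c == 1:
--             m += s[i]
--     return m
-- ===== SOURCE B (Python) =====
-- def ch(s):
--     head, sep, tail = s.partition(' ')
--     return tail.replace(' ', '') if sep else ''
-- ===== Notes on version B (the rewrite author's own statement) =====
-- stated objective: faster
-- what changed: Replaces the char-by-char state-machine loop (with quadratic string +=) with a split-at-first-space (str.partition) followed by removing the remaining spaces from the tail (str.replace).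
import Mathlib
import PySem

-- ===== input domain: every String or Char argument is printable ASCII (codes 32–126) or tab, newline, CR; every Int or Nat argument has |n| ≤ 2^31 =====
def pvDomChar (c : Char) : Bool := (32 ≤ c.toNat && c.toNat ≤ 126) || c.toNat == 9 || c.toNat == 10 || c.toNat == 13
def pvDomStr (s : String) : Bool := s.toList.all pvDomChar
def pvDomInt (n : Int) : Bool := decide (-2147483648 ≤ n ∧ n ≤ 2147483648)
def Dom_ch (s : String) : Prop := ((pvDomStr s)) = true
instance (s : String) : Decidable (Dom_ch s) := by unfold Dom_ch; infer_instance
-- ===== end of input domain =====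

-- B replaces A's char-by-char state-machine loop with partition-at-first-space then filter the tail (simpler decomposition).

-- ===== PORT A =====
-- loop body: 'if s[i] == " ": c = 1 elif c == 1: m += s[i]'
def chStep (p : List Char × Int) (c : Char) : List Char × Int :=
  if c = ' ' then (p.1, 1) else if p.2 = 1 then (p.1 ++ [c], p.2) else p

def ch (s : String) : String := String.ofList (s.toList.foldl chStep ([], 0)).1

-- ===== PORT B =====
-- s.partition(' ') ported as List.span on the chars; tail.replace(' ', '') as filter (· ≠ ' ')
def ch_alt (s : String) : String :=
  match s.toList.span (· ≠ ' ') with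
  | (_, []) => ""
  | (_, _ :: tail) => String.ofList (tail.filter (· ≠ ' '))

-- ===== PRECONDITION & SPEC =====
def Spec_ch (s : String) (out : String) : Prop := out = ch_alt s
instance (s : String) (out : String) : Decidable (Spec_ch s out) := by unfold Spec_ch; infer_instance

-- ===== CLAIM (what is proved, stated in full; the proofs are below) =====
def Claim_equal_ch : Prop := ∀ (s : String), Dom_ch s → Spec_ch s (ch s)

-- ===== LEMMAS AND PROOFS =====

theorem chFold_one (l : List Char) (m : List Char) :
    l.foldl chStep (m, 1) = (m ++ l.filter (· ≠ ' '), 1) := by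
  induction l generalizing m with
  | nil => simp
  | cons c t ih =>
    by_cases h : c = ' ' <;> simp [chStep, h, ih]

theorem chFold_zero (l : List Char) (m : List Char) :
    l.foldl chStep (m, 0) =
      (match l.dropWhile (· ≠ ' ') with
       | [] => (m, 0)
       | _ :: tail => (m ++ tail.filter (· ≠ ' '), 1)) := by
  induction l generalizing m with
  | nil => simp
  | cons c t ih =>
    by_cases h : c = ' '
    · simp [chStep, h, List.dropWhile, chFold_one]
    · simpa [chStep, h, List.dropWhile] using ih m

-- ===== VERDICT (by name: the statement is the Claim_ definition above) =====
theorem ch_spec : Claim_equal_ch := by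
  intro s _
  unfold Spec_ch ch ch_alt
  rw [chFold_zero, List.span_eq_takeWhile_dropWhile]
  cases h : s.toList.dropWhile (· ≠ ' ') <;> rfl
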